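-- pv_equiv track=rewrite | github.com/Alex-Au1/Haku_Bot | set_up/server_settings.py | format_prefixes
-- ===== SOURCE A (Python) =====
-- from typing import List
--
-- def format_prefixes(prefixes: List[str]) -> str:
--     result = ""
--     prefixes_len = len(prefixes)
--
--     for i in range(prefixes_len):
--         if (not i):
--             result += f"`{prefixes[i]}`"
--         elif (i < prefixes_len - 1):
--             result += f", `{prefixes[i]}`"
--         else:
--             result += f" or `{prefixes[i]}`"
--
--     return result
-- ===== SOURCE B (Python) =====
-- from typing import List
--
-- def format_prefixes(prefixes: List[str]) -> str:
--     quoted = [f"`{p}`" for p in prefixes]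
--     if not quoted:
--         return ""
--     if len(quoted) == 1:
--         return quoted[0]
--     return ", ".join(quoted[:-1]) + " or " + quoted[-1]
-- ===== Notes on version B (the rewrite author's own statement) =====
-- stated objective: simpler
-- what changed: Replaces the per-index conditional accumulation loop with a quote-then-join shape: map every prefix to its backticked form, then branch on length and build the result with a single join over the slice quoted[:-1] plus ' or ' and the last element.
import Mathlib
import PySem

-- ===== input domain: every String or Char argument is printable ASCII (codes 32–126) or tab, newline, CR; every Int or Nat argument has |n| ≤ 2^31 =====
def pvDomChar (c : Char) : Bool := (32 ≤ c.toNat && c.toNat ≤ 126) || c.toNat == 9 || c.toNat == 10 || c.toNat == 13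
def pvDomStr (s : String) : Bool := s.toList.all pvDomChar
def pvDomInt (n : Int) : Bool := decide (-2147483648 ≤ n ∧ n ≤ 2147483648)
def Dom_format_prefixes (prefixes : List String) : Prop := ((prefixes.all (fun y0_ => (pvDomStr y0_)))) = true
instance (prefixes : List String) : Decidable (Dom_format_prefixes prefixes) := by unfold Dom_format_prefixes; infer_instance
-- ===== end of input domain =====

-- B replaces A's per-index conditional accumulation loop by quote-all-then-join with length guards (objective: simpler).

-- ===== PORT A =====
def format_prefixes (prefixes : List String) : String :=
  let prefixes_len : Int := prefixes.length
  (PySem.List.pyRange 0 prefixes_len 1).foldl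
    (fun result i =>
      if i = 0 then
        result ++ ("`" ++ PySem.List.pyGetD prefixes i "" ++ "`")
      else if i < prefixes_len - 1 then
        result ++ (", `" ++ PySem.List.pyGetD prefixes i "" ++ "`")
      else
        result ++ (" or `" ++ PySem.List.pyGetD prefixes i "" ++ "`"))
    ""

-- ===== PORT B =====
def format_prefixes_alt (prefixes : List String) : String :=
  let quoted := prefixes.map (fun p => "`" ++ p ++ "`")
  match quoted with
  | [] => ""
  | [q] => q
  | q :: q' :: rest =>
      PySem.Str.join ", " (PySem.List.slice (q :: q' :: rest) none (some (-1)))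
        ++ " or " ++ PySem.List.pyGetD (q :: q' :: rest) (-1) ""

-- ===== PRECONDITION & SPEC =====
def Spec_format_prefixes (prefixes : List String) (out : String) : Prop := out = format_prefixes_alt prefixes
instance (prefixes : List String) (out : String) : Decidable (Spec_format_prefixes prefixes out) := by unfold Spec_format_prefixes; infer_instance

-- ===== CLAIM (what is proved, stated in full; the proofs are below) =====
def Claim_equal_format_prefixes : Prop := ∀ (prefixes : List String), Dom_format_prefixes prefixes → Spec_format_prefixes prefixes (format_prefixes prefixes)

-- ===== LEMMAS AND PROOFS =====

-- char-level shape of the tail ", `x`, `y` or `z`" of the result, over the raw (unquoted) items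
def pvTailL : List (List Char) → List Char
  | [] => []
  | [c] => ' ' :: 'o' :: 'r' :: ' ' :: '`' :: (c ++ ['`'])
  | c :: d :: rest => ',' :: ' ' :: '`' :: (c ++ '`' :: pvTailL (d :: rest))

-- char-level shape of the whole result
def pvFormL : List (List Char) → List Char
  | [] => []
  | [c] => '`' :: (c ++ ['`'])
  | c :: d :: rest => '`' :: (c ++ '`' :: pvTailL (d :: rest))

-- what ", ".join contributes after its first element
def pvMid : List (List Char) → List Char
  | [] => []
  | c :: rest => ',' :: ' ' :: (c ++ pvMid rest)

lemma pvStrEq {s t : String} (h : s.toList = t.toList) : s = t := by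
  have := congrArg String.ofList h; simpa using this

lemma pv_A_loop : ∀ (xs pre : List String) (acc : String), pre ≠ [] →
    ((PySem.List.pyRange (pre.length : Int) ((pre.length : Int) + (xs.length : Int)) 1).foldl
      (fun result i =>
        if i = 0 then
          result ++ ("`" ++ PySem.List.pyGetD (pre ++ xs) i "" ++ "`")
        else if i < ((pre ++ xs).length : Int) - 1 then
          result ++ (", `" ++ PySem.List.pyGetD (pre ++ xs) i "" ++ "`")
        else
          result ++ (" or `" ++ PySem.List.pyGetD (pre ++ xs) i "" ++ "`"))
      acc).toList = acc.toList ++ pvTailL (xs.map String.toList) := by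
  intro xs
  induction xs with
  | nil =>
      intro pre acc _
      have h0 : PySem.List.pyRange (pre.length : Int)
          ((pre.length : Int) + (([] : List String).length : Int)) 1 = [] := by
        apply PySem.List.pyRange_one_eq_nil; simp
      rw [h0]
      simp [pvTailL]
  | cons x xs' ih =>
      intro pre acc hpre
      have hposn : 0 < pre.length := List.length_pos_iff.mpr hpre
      have hlt : (pre.length : Int) < (pre.length : Int) + ((x :: xs').length : Int) := by
        simp only [List.length_cons]; push_cast; omega
      rw [PySem.List.pyRange_one_cons hlt, List.foldl_cons]
      have hne0 : ¬ ((pre.length : Int) = 0) := by exact_mod_cast Nat.pos_iff_ne_zero.mp hposn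
      have hget : PySem.List.pyGetD (pre ++ x :: xs') (pre.length : Int) "" = x := by
        simp [List.getD]
      cases xs' with
      | nil =>
          have hcond : ¬ ((pre.length : Int) < ((pre ++ [x]).length : Int) - 1) := by
            simp
          simp only [hne0, if_false, hcond, if_false, hget]
          have hnil : PySem.List.pyRange ((pre.length : Int) + 1)
              ((pre.length : Int) + (([x] : List String).length : Int)) 1 = [] := by
            apply PySem.List.pyRange_one_eq_nil; simp
          rw [hnil]
          simp [pvTailL]
      | cons y rest =>
          have hcond : (pre.length : Int) < ((pre ++ x :: y :: rest).length : Int) - 1 := by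
            simp; omega
          simp only [hne0, if_false, hcond, if_true, hget]
          have hsplit : pre ++ x :: y :: rest = (pre ++ [x]) ++ (y :: rest) := by simp
          rw [hsplit]
          have h1 : (pre.length : Int) + 1 = ((pre ++ [x]).length : Int) := by simp
          have h2 : (pre.length : Int) + ((x :: y :: rest).length : Int)
              = ((pre ++ [x]).length : Int) + ((y :: rest).length : Int) := by simp; omega
          rw [h1, h2, ih (pre ++ [x]) (acc ++ (", `" ++ x ++ "`")) (by simp)]
          simp [pvTailL]

lemma pv_A_eq (xs : List String) : (format_prefixes xs).toList = pvFormL (xs.map String.toList) := by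
  match xs with
  | [] => decide
  | [x] =>
      have hl : (([x] : List String).length : Int) = 1 := by simp
      have h1 : PySem.List.pyRange 0 1 1 = [0] := by decide
      simp only [format_prefixes, hl, h1, List.foldl_cons, List.foldl_nil]
      simp [PySem.List.pyGetD_zero_cons, pvFormL]
  | x :: y :: rest =>
      have hlt : (0 : Int) < ((x :: y :: rest).length : Int) := by simp; omega
      simp only [format_prefixes]
      rw [PySem.List.pyRange_one_cons hlt, List.foldl_cons, if_pos rfl,
          show (0 : Int) + 1 = 1 from by norm_num]
      have hA := pv_A_loop (y :: rest) [x] ("" ++ ("`" ++ PySem.List.pyGetD (x :: y :: rest) 0 "" ++ "`")) (by simp)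
      simp only [List.cons_append, List.nil_append, List.length_singleton, Nat.cast_one] at hA
      rw [show ((1 : Int) + ((y :: rest).length : Int)) = (((x :: y :: rest).length : Int)) from by simp; omega] at hA
      rw [hA]
      simp [PySem.List.pyGetD_zero_cons, pvFormL]

lemma pv_join : ∀ (l : List String) (a : String),
    (PySem.Str.join ", " (a :: l)).toList = a.toList ++ pvMid (l.map String.toList) := by
  intro l
  induction l with
  | nil => intro a; simp [PySem.Str.join, PySem.Chars.join, List.intercalate, pvMid]
  | cons b l' ih =>
      intro a
      have hb := ih b
      simp only [PySem.Str.join, PySem.Chars.join, List.map_cons, String.toList_ofList] at hb ⊢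
      rw [show (", " : String).toList = [',', ' '] from rfl] at hb ⊢
      rw [show List.intercalate [',', ' '] (a.toList :: b.toList :: List.map String.toList l')
          = a.toList ++ [',', ' '] ++ List.intercalate [',', ' '] (b.toList :: List.map String.toList l') from by
        simp [List.intercalate, List.intersperse]]
      rw [hb]
      simp [pvMid]

lemma pv_B_tail : ∀ (ys : List String) (h : ys ≠ []),
    pvMid ((ys.dropLast).map (fun p => '`' :: (p.toList ++ ['`'])))
      ++ (' ' :: 'o' :: 'r' :: ' ' :: '`' :: ((ys.getLast h).toList ++ ['`']))
    = pvTailL (ys.map String.toList) := by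
  intro ys
  induction ys with
  | nil => intro h; exact absurd rfl h
  | cons y ys' ih =>
      intro _
      cases ys' with
      | nil => simp [pvMid, pvTailL]
      | cons z rest =>
          have hzr : (z :: rest : List String) ≠ [] := by simp
          rw [List.dropLast_cons_of_ne_nil hzr, List.getLast_cons hzr]
          simp only [List.map_cons, pvMid, pvTailL]
          have hih := ih hzr
          simp only [List.map_cons] at hih
          rw [← hih]
          simp

lemma pv_B_eq (xs : List String) : (format_prefixes_alt xs).toList = pvFormL (xs.map String.toList) := by
  match xs with
  | [] => decide
  | [x] => simp [format_prefixes_alt, pvFormL]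
  | x :: y :: rest =>
      simp only [format_prefixes_alt, List.map_cons]
      have hq : ("`" ++ x ++ "`") :: ("`" ++ y ++ "`") :: rest.map (fun p => "`" ++ p ++ "`")
          = (x :: y :: rest).map (fun p => "`" ++ p ++ "`") := by simp
      have hne : (x :: y :: rest).map (fun p => "`" ++ p ++ "`") ≠ [] := by simp
      have hyr : (y :: rest : List String) ≠ [] := by simp
      rw [hq, PySem.List.slice_to_neg_one, PySem.List.pyGetD_neg_one _ "" hne,
          List.getLast_map, ← List.map_dropLast,
          List.dropLast_cons_of_ne_nil hyr, List.getLast_cons hyr]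
      simp only [List.map_cons, String.toList_append]
      rw [pv_join]
      have hbt := pv_B_tail (y :: rest) hyr
      simp only [List.map_cons] at hbt
      rw [show pvFormL (x.toList :: y.toList :: List.map String.toList rest)
          = '`' :: (x.toList ++ '`' :: pvTailL (y.toList :: List.map String.toList rest)) from by
        simp [pvFormL]]
      rw [← hbt]
      have hcomp : (String.toList ∘ fun p => "`" ++ p ++ "`") = (fun p : String => '`' :: (p.toList ++ ['`'])) := by
        funext p; simp
      simp [List.map_dropLast, hcomp]

-- ===== VERDICT (by name: the statement is the Claim_ definition above) =====
theorem format_prefixes_spec : Claim_equal_format_prefixes := by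
  intro prefixes _
  unfold Spec_format_prefixes
  exact pvStrEq ((pv_A_eq prefixes).trans (pv_B_eq prefixes).symm)
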